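-- pv_equiv track=rewrite | github.com/evanvin/advent-of-code-2021 | 3/solution.py | get_bit_counts
-- ===== SOURCE A (Python) =====
-- def get_bit_counts(numbers, idx=-1):
--     bit_counts = [
--         [0, 0] for _ in numbers[0]
--     ]  # a list of lists that keep track of the counts of 0 and 1 bits
--
--     start = 0 if idx == -1 else idx
--     end = len(bit_counts) if idx == -1 else idx + 1
--     for n in numbers:
--         for j in range(start, end):
--             if n[j] == "0":
--                 bit_counts[j][0] += 1
--             else:
--                 bit_counts[j][1] += 1
--
--     return bit_counts
-- ===== SOURCE B (Python) =====
-- def get_bit_counts(numbers, idx=-1):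
--     bit_counts = [[0, 0] for _ in numbers[0]]
--     start = 0 if idx == -1 else idx
--     end = len(bit_counts) if idx == -1 else idx + 1
--     for j in range(start, end):
--         col = [n[j] for n in numbers]
--         zeros = col.count("0")
--         bit_counts[j] = [zeros, len(col) - zeros]
--     return bit_counts
-- ===== Notes on version B (the rewrite author's own statement) =====
-- stated objective: simpler
-- what changed: B traverses column-wise: for each selected column it extracts the column, counts its '0' characters once with list.count, and writes the pair directly, instead of A's row-wise loop that increments a mutable counter cell per bit.
import Mathlib
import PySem

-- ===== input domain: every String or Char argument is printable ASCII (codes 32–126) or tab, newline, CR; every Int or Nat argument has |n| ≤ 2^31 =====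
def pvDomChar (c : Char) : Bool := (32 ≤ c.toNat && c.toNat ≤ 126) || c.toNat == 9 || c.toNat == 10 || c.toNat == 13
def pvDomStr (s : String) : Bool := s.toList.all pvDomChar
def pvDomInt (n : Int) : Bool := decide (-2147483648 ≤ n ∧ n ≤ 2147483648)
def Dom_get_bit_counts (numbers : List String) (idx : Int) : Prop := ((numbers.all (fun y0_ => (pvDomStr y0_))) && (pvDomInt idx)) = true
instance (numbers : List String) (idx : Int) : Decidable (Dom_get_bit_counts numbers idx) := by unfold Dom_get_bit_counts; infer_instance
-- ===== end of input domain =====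

-- B re-implements the count column-wise (extract each selected column, count its '0's once, write the
-- pair directly) instead of A's row-wise traversal incrementing mutable counter cells; same cost class.

-- ===== PORT A =====
def get_bit_counts (numbers : List String) (idx : Int) : List (List Int) :=
  let bit_counts : List (List Int) :=
    (PySem.List.pyGetD numbers 0 "").toList.map (fun _ => [0, 0])
  let start : Int := if idx = -1 then 0 else idx
  let stop : Int := if idx = -1 then (bit_counts.length : Int) else idx + 1
  numbers.foldl (fun bc n =>
    (PySem.List.pyRange start stop 1).foldl (fun bc j =>
      if PySem.Str.pyGet? n j == some '0' then
        PySem.List.pySetD bc j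
          (PySem.List.pySetD (PySem.List.pyGetD bc j [])
            0 (PySem.List.pyGetD (PySem.List.pyGetD bc j []) 0 0 + 1))
      else
        PySem.List.pySetD bc j
          (PySem.List.pySetD (PySem.List.pyGetD bc j [])
            1 (PySem.List.pyGetD (PySem.List.pyGetD bc j []) 1 0 + 1)))
      bc) bit_counts

-- ===== PORT B =====
def get_bit_counts_alt (numbers : List String) (idx : Int) : List (List Int) :=
  let bit_counts : List (List Int) :=
    (PySem.List.pyGetD numbers 0 "").toList.map (fun _ => [0, 0])
  let start : Int := if idx = -1 then 0 else idx
  let stop : Int := if idx = -1 then (bit_counts.length : Int) else idx + 1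
  (PySem.List.pyRange start stop 1).foldl (fun bc j =>
    let col : List (Option Char) := numbers.map (fun n => PySem.Str.pyGet? n j)
    let zeros : Int := (col.count (some '0') : Int)
    PySem.List.pySetD bc j [zeros, (col.length : Int) - zeros]) bit_counts

-- ===== PRECONDITION & SPEC =====
-- Pre_ excludes exactly the inputs on which A raises IndexError: the empty list (numbers[0]),
-- and column indices that fall outside some row or outside bit_counts.
def Pre_get_bit_counts (numbers : List String) (idx : Int) : Prop :=
  numbers ≠ [] ∧
  (if idx = -1 then
     ∀ n ∈ numbers, ((numbers.headD "").toList.length : Int) ≤ (n.toList.length : Int)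
   else if 0 ≤ idx then
     idx < ((numbers.headD "").toList.length : Int) ∧ ∀ n ∈ numbers, idx < (n.toList.length : Int)
   else
     -idx ≤ ((numbers.headD "").toList.length : Int) ∧ ∀ n ∈ numbers, -idx ≤ (n.toList.length : Int))
instance (numbers : List String) (idx : Int) : Decidable (Pre_get_bit_counts numbers idx) := by
  unfold Pre_get_bit_counts; infer_instance

def pvWitness_get_bit_counts : List String × Int := (["01", "10", "11"], -1)

def Spec_get_bit_counts (numbers : List String) (idx : Int) (out : List (List Int)) : Prop := out = get_bit_counts_alt numbers idx
instance (numbers : List String) (idx : Int) (out : List (List Int)) : Decidable (Spec_get_bit_counts numbers idx out) := by unfold Spec_get_bit_counts; infer_instance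

-- ===== CLAIM (what is proved, stated in full; the proofs are below) =====
def Claim_equal_get_bit_counts : Prop := ∀ (numbers : List String) (idx : Int), Dom_get_bit_counts numbers idx → Pre_get_bit_counts numbers idx → Spec_get_bit_counts numbers idx (get_bit_counts numbers idx)

-- ===== LEMMAS AND PROOFS =====

lemma set_getD_append {α : Type} (M D : List α) (x d : α) (f : α → α) :
    (M ++ x :: D).set M.length (f ((M ++ x :: D).getD M.length d)) = M ++ f x :: D := by
  have hg : (M ++ x :: D).getD M.length d = x := by
    rw [List.getD_eq_getElem?_getD]; simp
  rw [hg, List.set_append_right _ _ (by omega)]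
  simp

-- a left-to-right pass that rewrites each of the first w cells from its current value
lemma foldl_update_range {α : Type} (g : Nat → α → α) (d : α) :
    ∀ (w : Nat) (bc : List α), w ≤ bc.length →
      (List.range w).foldl (fun b t => b.set t (g t (b.getD t d))) bc
        = (List.range w).map (fun t => g t (bc.getD t d)) ++ bc.drop w := by
  intro w
  induction w with
  | zero => simp
  | succ w ih =>
    intro bc h
    rw [List.range_succ, List.foldl_append, ih bc (by omega)]
    have hlt : w < bc.length := by omega
    rw [List.drop_eq_getElem_cons hlt]
    simp only [List.foldl_cons, List.foldl_nil, List.map_append, List.map_cons, List.map_nil]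
    have hlen : ((List.range w).map (fun t => g t (bc.getD t d))).length = w := by simp
    have hset := set_getD_append ((List.range w).map (fun t => g t (bc.getD t d)))
      (bc.drop (w + 1)) bc[w] d (g w)
    rw [hlen] at hset
    rw [hset]
    simp [List.getElem?_eq_getElem hlt]

lemma foldl_set_range {α : Type} (c : Nat → α) (d : α) (w : Nat) (bc : List α)
    (h : w ≤ bc.length) :
    (List.range w).foldl (fun b t => b.set t (c t)) bc = (List.range w).map c ++ bc.drop w :=
  foldl_update_range (fun t _ => c t) d w bc h

lemma pySetD_neg {α : Type} (xs : List α) (i : Int) (v : α) (h0 : i < 0)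
    (h1 : -i ≤ (xs.length : Int)) :
    PySem.List.pySetD xs i v = xs.set (xs.length - (-i).toNat) v := by
  unfold PySem.List.pySetD PySem.List.pySet? PySem.List.pyIdx?
  split_ifs with h2 h3 <;> try omega
  simp

lemma pyGetD_neg' {α : Type} (xs : List α) (i : Int) (d : α) (h0 : i < 0)
    (h1 : -i ≤ (xs.length : Int)) :
    PySem.List.pyGetD xs i d = xs.getD (xs.length - (-i).toNat) d := by
  unfold PySem.List.pyGetD PySem.List.pyGet? PySem.List.pyIdx?
  split_ifs with h2 h3 <;> try omega
  simp [List.getD_eq_getElem?_getD]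

-- A's outer loop in the idx = -1 case: each row pass bumps one cell per column
lemma outerA (w : Nat) (ns : List String) :
    ∀ (F G : Nat → Int),
      ns.foldl (fun bc n => (List.range w).foldl
          (fun b (t : Nat) => b.set t ((fun row => if PySem.Str.pyGet? n ((t : Nat) : Int) == some '0'
              then PySem.List.pySetD row 0 (PySem.List.pyGetD row 0 0 + 1)
              else PySem.List.pySetD row 1 (PySem.List.pyGetD row 1 0 + 1)) (b.getD t []))) bc)
        ((List.range w).map (fun (t : Nat) => [F t, G t]))
      = (List.range w).map (fun (t : Nat) =>
          [F t + (ns.countP (fun n => PySem.Str.pyGet? n ((t : Nat) : Int) == some '0') : Int),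
           G t + ((ns.length : Int)
             - (ns.countP (fun n => PySem.Str.pyGet? n ((t : Nat) : Int) == some '0') : Int))]) := by
  induction ns with
  | nil =>
    intro F G
    simp
  | cons n ns ih =>
    intro F G
    rw [List.foldl_cons,
        foldl_update_range (fun (t : Nat) row => if PySem.Str.pyGet? n ((t : Nat) : Int) == some '0'
              then PySem.List.pySetD row 0 (PySem.List.pyGetD row 0 0 + 1)
              else PySem.List.pySetD row 1 (PySem.List.pyGetD row 1 0 + 1)) []
          w _ (by simp)]
    rw [List.drop_of_length_le (by simp), List.append_nil]
    have hm : ((List.range w).map (fun (t : Nat) =>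
        (fun row => if PySem.Str.pyGet? n ((t : Nat) : Int) == some '0'
            then PySem.List.pySetD row 0 (PySem.List.pyGetD row 0 0 + 1)
            else PySem.List.pySetD row 1 (PySem.List.pyGetD row 1 0 + 1))
          (((List.range w).map (fun (t : Nat) => [F t, G t])).getD t [])))
        = (List.range w).map (fun (t : Nat) =>
            [(if PySem.Str.pyGet? n ((t : Nat) : Int) == some '0' then F t + 1 else F t),
             (if PySem.Str.pyGet? n ((t : Nat) : Int) == some '0' then G t else G t + 1)]) := by
      refine List.map_congr_left ?_
      intro t ht
      rw [List.mem_range] at ht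
      rw [PySem.List.getD_map_range _ _ _ _ ht]
      by_cases hq : (PySem.Str.pyGet? n ((t : Nat) : Int) == some '0') = true
      · simp only [PySem.Str.pyGet?_natCast] at hq ⊢
        simp [hq, PySem.List.pySetD, PySem.List.pySet?, PySem.List.pyIdx?,
              PySem.List.pyGetD, PySem.List.pyGet?]
      · simp only [PySem.Str.pyGet?_natCast] at hq ⊢
        simp [hq, PySem.List.pySetD, PySem.List.pySet?, PySem.List.pyIdx?,
              PySem.List.pyGetD, PySem.List.pyGet?]
    rw [hm, ih (fun (t : Nat) => if PySem.Str.pyGet? n ((t : Nat) : Int) == some '0' then F t + 1 else F t)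
               (fun (t : Nat) => if PySem.Str.pyGet? n ((t : Nat) : Int) == some '0' then G t else G t + 1)]
    refine List.map_congr_left ?_
    intro t ht
    by_cases hq : (PySem.Str.pyGet? n ((t : Nat) : Int) == some '0') = true
    · simp only [List.countP_cons, hq, if_true, List.cons.injEq, and_true,
        List.length_cons]
      push_cast
      omega
    · simp only [List.countP_cons, hq, List.cons.injEq, and_true,
        List.length_cons]
      push_cast
      omega

-- A's loop in the single-column case: only the cell at position t changes
lemma foldSingle (t : Nat) (j : Int) (w : Nat)
    (hget : ∀ (xs : List (List Int)), xs.length = w →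
      PySem.List.pyGetD xs j [] = xs.getD t [])
    (hset : ∀ (xs : List (List Int)) (v : List Int), xs.length = w →
      PySem.List.pySetD xs j v = xs.set t v)
    (ht : t < w) :
    ∀ (ns : List String) (bc : List (List Int)) (a b : Int), bc.length = w →
      bc.getD t [] = [a, b] →
      ns.foldl (fun bc n =>
        if PySem.Str.pyGet? n j == some '0' then
          PySem.List.pySetD bc j
            (PySem.List.pySetD (PySem.List.pyGetD bc j [])
              0 (PySem.List.pyGetD (PySem.List.pyGetD bc j []) 0 0 + 1))
        else
          PySem.List.pySetD bc j
            (PySem.List.pySetD (PySem.List.pyGetD bc j [])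
              1 (PySem.List.pyGetD (PySem.List.pyGetD bc j []) 1 0 + 1))) bc
      = bc.set t
          [a + (ns.countP (fun n => PySem.Str.pyGet? n j == some '0') : Int),
           b + ((ns.length : Int)
             - (ns.countP (fun n => PySem.Str.pyGet? n j == some '0') : Int))] := by
  intro ns
  induction ns with
  | nil =>
    intro bc a b hlen hcell
    have htl : t < bc.length := by omega
    have hbc : bc[t]'htl = [a, b] := by
      rw [← hcell]; simp [List.getD_eq_getElem?_getD, List.getElem?_eq_getElem htl]
    simp only [List.foldl_nil, List.countP_nil, List.length_nil]
    rw [show a + ((0 : Nat) : Int) = a by omega,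
        show b + (((0 : Nat) : Int) - ((0 : Nat) : Int)) = b by omega, ← hbc]
    exact (List.set_getElem_self htl).symm
  | cons n ns ih =>
    intro bc a b hlen hcell
    rw [List.foldl_cons, hget bc hlen, hcell]
    by_cases hq : (PySem.Str.pyGet? n j == some '0') = true
    · rw [if_pos hq]
      have hrow : PySem.List.pySetD [a, b] 0 (PySem.List.pyGetD [a, b] 0 0 + 1) = [a + 1, b] := by
        simp [PySem.List.pySetD, PySem.List.pySet?, PySem.List.pyIdx?,
              PySem.List.pyGetD, PySem.List.pyGet?]
      rw [hrow, hset bc _ hlen,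
          ih (bc.set t [a + 1, b]) (a + 1) b (by simp [hlen])
            (by simp [List.getD_eq_getElem?_getD, ht, hlen]),
          List.set_set]
      congr 1
      simp only [List.countP_cons, hq, if_true, List.cons.injEq, and_true, List.length_cons]
      push_cast
      omega
    · rw [if_neg hq]
      have hrow : PySem.List.pySetD [a, b] 1 (PySem.List.pyGetD [a, b] 1 0 + 1) = [a, b + 1] := by
        simp [PySem.List.pySetD, PySem.List.pySet?, PySem.List.pyIdx?,
              PySem.List.pyGetD, PySem.List.pyGet?]
      rw [hrow, hset bc _ hlen,
          ih (bc.set t [a, b + 1]) a (b + 1) (by simp [hlen])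
            (by simp [List.getD_eq_getElem?_getD, ht, hlen]),
          List.set_set]
      congr 1
      simp only [List.countP_cons, hq, List.cons.injEq, and_true, List.length_cons]
      push_cast
      omega

-- ===== VERDICT (by name: the statement is the Claim_ definition above) =====
theorem get_bit_counts_spec : Claim_equal_get_bit_counts := by
  intro numbers idx _hdom hpre
  obtain ⟨hne, hrest⟩ := hpre
  obtain ⟨h0, t0, rfl⟩ := List.exists_cons_of_ne_nil hne
  unfold Spec_get_bit_counts get_bit_counts get_bit_counts_alt
  simp only [PySem.List.pyGetD_zero_cons, List.length_map]
  by_cases hidx : idx = -1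
  · -- full-range case
    rw [if_pos hidx] at hrest
    simp only [if_pos hidx, PySem.List.pyRange_zero_natCast, List.foldl_map,
      PySem.List.pySetD_natCast, PySem.List.pyGetD_natCast,
      List.map_const']
    have hconv : (fun (bc : List (List Int)) (n : String) =>
        (List.range h0.toList.length).foldl
          (fun (x : List (List Int)) (y : Nat) =>
            if (PySem.Str.pyGet? n (y : Int) == some '0') = true then
              x.set y (PySem.List.pySetD (x.getD y []) 0 (PySem.List.pyGetD (x.getD y []) 0 0 + 1))
            else x.set y (PySem.List.pySetD (x.getD y []) 1 (PySem.List.pyGetD (x.getD y []) 1 0 + 1))) bc)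
      = (fun (bc : List (List Int)) (n : String) => (List.range h0.toList.length).foldl
          (fun b (t : Nat) => b.set t ((fun row => if PySem.Str.pyGet? n ((t : Nat) : Int) == some '0'
              then PySem.List.pySetD row 0 (PySem.List.pyGetD row 0 0 + 1)
              else PySem.List.pySetD row 1 (PySem.List.pyGetD row 1 0 + 1)) (b.getD t []))) bc) := by
      funext bc n
      congr 1
      funext b t
      exact (apply_ite (b.set t) _ _ _).symm
    have hrep : List.replicate h0.toList.length ([0, 0] : List Int)
        = (List.range h0.toList.length).map (fun t => [(fun _ : Nat => (0 : Int)) t, (fun _ : Nat => (0 : Int)) t]) := by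
      simp [List.map_const']
    rw [hconv, hrep, outerA h0.toList.length (h0 :: t0) (fun _ => 0) (fun _ => 0)]
    rw [foldl_set_range _ [] h0.toList.length _ (by simp)]
    rw [List.drop_of_length_le (by simp), List.append_nil]
    refine List.map_congr_left ?_
    intro t ht
    rw [List.count_eq_countP, List.countP_map]
    simp only [zero_add]
    rfl
  · rw [if_neg hidx] at hrest
    simp only [if_neg hidx, PySem.List.pyRange_one_singleton, List.map_const']
    by_cases hpos : 0 ≤ idx
    · rw [if_pos hpos] at hrest
      obtain ⟨hlt, -⟩ := hrest
      simp only [List.headD_cons] at hlt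
      have ht : idx.toNat < h0.toList.length := by omega
      have hget : ∀ (xs : List (List Int)), xs.length = h0.toList.length →
          PySem.List.pyGetD xs idx [] = xs.getD idx.toNat [] :=
        fun xs _ => PySem.List.pyGetD_of_nonneg xs [] hpos
      have hset : ∀ (xs : List (List Int)) (v : List Int), xs.length = h0.toList.length →
          PySem.List.pySetD xs idx v = xs.set idx.toNat v :=
        fun xs v _ => PySem.List.pySetD_of_nonneg xs v hpos
      have hlen : (List.replicate h0.toList.length ([0, 0] : List Int)).length = h0.toList.length := by
        simp
      have hcell : (List.replicate h0.toList.length ([0, 0] : List Int)).getD idx.toNat [] = [0, 0] := by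
        have ht' : idx.toNat < h0.length := by simpa using ht
        simp [List.getD_eq_getElem?_getD, ht']
      refine (foldSingle idx.toNat idx h0.toList.length hget hset ht (h0 :: t0)
        (List.replicate h0.toList.length [0, 0]) 0 0 hlen hcell).trans ?_
      rw [List.foldl_cons, List.foldl_nil, hset _ _ hlen]
      congr 1
      rw [List.count_eq_countP, List.countP_map]
      simp only [zero_add]
      rfl
    · have hidxneg : idx < 0 := by omega
      rw [if_neg hpos] at hrest
      obtain ⟨hle, -⟩ := hrest
      simp only [List.headD_cons] at hle
      have ht : h0.toList.length - (-idx).toNat < h0.toList.length := by omega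
      have hget : ∀ (xs : List (List Int)), xs.length = h0.toList.length →
          PySem.List.pyGetD xs idx [] = xs.getD (h0.toList.length - (-idx).toNat) [] := by
        intro xs hl
        rw [pyGetD_neg' xs idx [] hidxneg (by rw [hl]; exact_mod_cast hle), hl]
      have hset : ∀ (xs : List (List Int)) (v : List Int), xs.length = h0.toList.length →
          PySem.List.pySetD xs idx v = xs.set (h0.toList.length - (-idx).toNat) v := by
        intro xs v hl
        rw [pySetD_neg xs idx v hidxneg (by rw [hl]; exact_mod_cast hle), hl]
      have hlen : (List.replicate h0.toList.length ([0, 0] : List Int)).length = h0.toList.length := by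
        simp
      have hcell : (List.replicate h0.toList.length ([0, 0] : List Int)).getD
          (h0.toList.length - (-idx).toNat) [] = [0, 0] := by
        have ht' : h0.toList.length - (-idx).toNat < h0.length := by simpa using ht
        have hpos0 : 0 < h0.length := by omega
        simp [List.getD_eq_getElem?_getD, hpos0, hidxneg]
      refine (foldSingle (h0.toList.length - (-idx).toNat) idx h0.toList.length hget hset ht
        (h0 :: t0) (List.replicate h0.toList.length [0, 0]) 0 0 hlen hcell).trans ?_
      rw [List.foldl_cons, List.foldl_nil, hset _ _ hlen]
      congr 1
      rw [List.count_eq_countP, List.countP_map]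
      simp only [zero_add]
      rfl
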